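-- pv_equiv track=rewrite | github.com/CrSb0001/mathfunclib | mathfunclib/cryptography/simpleciphers.py | decryp_rotN
-- ===== SOURCE A (Python) =====
-- def decryp_rotN(_str,N=13):
--     '''
--     Decrypts a string using ROT-N
--
--     :param _str: The input string to decrypt
--     :param N:    What ROT function we decrypt with.
--                  By default, this is 13.
--
--     :returns: The decrypted string. Note that we could
--               simply encrypt with ROT(26-N) to also
--               decrypt the text.
--     '''
--     alphabet = 'ZYXWVUTSRQPONMLKJIHGFEDCBAZYXWVUTSRQPONMLKJIHGFEDCBzyxwvutsrqponmlkjihgfedcbazyxwvutsrqponmlkjihgfedcb'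
--
--     if type(_str)!=str:
--         return "Parameter [_str] must be a string."
--     if type(N)!=int:
--         return "Parameter [N] must be an integer."
--     if (N<1) or (N>25):
--         return "Disallowed integer values detected."
--
--     RotN=''
--     for i in _str:
--         if i in alphabet:
--             RotN+=alphabet[alphabet.index(i)+N]
--         else:
--             RotN+=i
--     return RotN
-- ===== SOURCE B (Python) =====
-- def decryp_rotN(_str, N=13):
--     if type(_str) != str:
--         return "Parameter [_str] must be a string."
--     if type(N) != int:
--         return "Parameter [N] must be an integer."
--     if N < 1 or N > 25:
--         return "Disallowed integer values detected."
--     out = []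
--     for c in _str:
--         o = ord(c)
--         if 65 <= o <= 90:
--             out.append(chr(90 - ((90 - o + N) % 26)))
--         elif 97 <= o <= 122:
--             out.append(chr(122 - ((122 - o + N) % 26)))
--         else:
--             out.append(c)
--     return ''.join(out)
-- ===== Notes on version B (the rewrite author's own statement) =====
-- stated objective: simpler
-- what changed: Replaced A's 102-character reversed-alphabet lookup table (substring membership test + str.index + re-index at index+N per character) with direct closed-form modular arithmetic on each character's code point (uppercase and lowercase handled by the 90/122 mod-26 formula, other characters passed through), joining accumulated characters at the end.
import Mathlib
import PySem

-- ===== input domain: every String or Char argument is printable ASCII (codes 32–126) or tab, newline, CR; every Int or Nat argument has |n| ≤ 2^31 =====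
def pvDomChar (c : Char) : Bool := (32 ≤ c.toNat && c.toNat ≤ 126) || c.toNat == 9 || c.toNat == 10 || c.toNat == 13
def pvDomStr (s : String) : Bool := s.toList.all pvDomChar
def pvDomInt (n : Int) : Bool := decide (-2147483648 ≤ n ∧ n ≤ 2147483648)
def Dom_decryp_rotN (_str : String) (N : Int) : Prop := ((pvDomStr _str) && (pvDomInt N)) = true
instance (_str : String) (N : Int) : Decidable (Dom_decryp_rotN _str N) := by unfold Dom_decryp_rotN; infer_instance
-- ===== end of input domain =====

-- B replaces A's 102-char reversed-alphabet lookup table (membership scan + index + reindex per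
-- character) by direct modular arithmetic on character codes; objective: simpler (no speed claim).
-- A's first two type guards are unrepresentable under the Lean types (_str : String, N : Int),
-- so only the N-range guard appears in the ports.

-- ===== PORT A =====
def rotAlpha : List Char :=
  "ZYXWVUTSRQPONMLKJIHGFEDCBAZYXWVUTSRQPONMLKJIHGFEDCBzyxwvutsrqponmlkjihgfedcbazyxwvutsrqponmlkjihgfedcb".toList

-- body of A's loop for one character i: membership test, str.index, then lookup at index+N
-- (the `none` fallbacks are unreachable: membership guards index?, and index+N ≤ 101 < 102)
def segA (N : Int) (i : Char) : List Char :=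
  if i ∈ rotAlpha then
    match PySem.List.index? rotAlpha i with
    | some idx => (PySem.List.pyGet? rotAlpha ((idx : Int) + N)).elim [] (fun c => [c])
    | none => []
  else [i]

def decryp_rotN (_str : String) (N : Int) : String :=
  if N < 1 ∨ N > 25 then "Disallowed integer values detected."
  else String.ofList (_str.toList.foldl (fun RotN i => RotN ++ segA N i) [])

-- ===== PORT B =====
def shiftCh (N : Int) (c : Char) : Char :=
  let o : Int := c.toNat
  if 65 ≤ o ∧ o ≤ 90 then Char.ofNat (90 - PySem.Int.mod (90 - o + N) 26).toNat
  else if 97 ≤ o ∧ o ≤ 122 then Char.ofNat (122 - PySem.Int.mod (122 - o + N) 26).toNat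
  else c

def decryp_rotN_alt (_str : String) (N : Int) : String :=
  if N < 1 ∨ N > 25 then "Disallowed integer values detected."
  else String.ofList (_str.toList.foldl (fun out c => out ++ [shiftCh N c]) [])

-- ===== PRECONDITION & SPEC =====
def Spec_decryp_rotN (_str : String) (N : Int) (out : String) : Prop := out = decryp_rotN_alt _str N
instance (_str : String) (N : Int) (out : String) : Decidable (Spec_decryp_rotN _str N out) := by unfold Spec_decryp_rotN; infer_instance

-- ===== CLAIM (what is proved, stated in full; the proofs are below) =====
def Claim_equal_decryp_rotN : Prop := ∀ (_str : String) (N : Int), Dom_decryp_rotN _str N → Spec_decryp_rotN _str N (decryp_rotN _str N)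

-- ===== LEMMAS AND PROOFS =====

-- first occurrence of each uppercase letter in the table: 'Z' at 0 … 'A' at 25
set_option maxRecDepth 8192 in
theorem upperIdx : ∀ u < 26, PySem.List.index? rotAlpha (Char.ofNat (90 - u)) = some u := by decide

-- first occurrence of each lowercase letter: 'z' at 51 … 'a' at 76
set_option maxRecDepth 8192 in
theorem lowerIdx : ∀ u < 26, PySem.List.index? rotAlpha (Char.ofNat (122 - u)) = some (51 + u) := by decide

-- table contents, uppercase half (indices reachable as index+N, N ≤ 25)
set_option maxRecDepth 8192 in
theorem alphaGetHi : ∀ k < 51, rotAlpha[k]? = some (Char.ofNat (90 - k % 26)) := by decide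

-- table contents, lowercase half
set_option maxRecDepth 8192 in
theorem alphaGetLo : ∀ k < 51, rotAlpha[51 + k]? = some (Char.ofNat (122 - k % 26)) := by decide

-- non-letters in the domain are not in the table
set_option maxRecDepth 8192 in
theorem nonLetter : ∀ o < 127, (o < 65 ∨ (90 < o ∧ o < 97) ∨ 122 < o) → Char.ofNat o ∉ rotAlpha := by decide

theorem perChar (c : Char) (N : Int) (hd : pvDomChar c = true) (h1 : 1 ≤ N) (h2 : N ≤ 25) :
    segA N c = [shiftCh N c] := by
  have hc : Char.ofNat c.toNat = c := Char.ofNat_toNat c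
  have hlt : c.toNat < 127 := by
    unfold pvDomChar at hd
    simp only [Bool.or_eq_true, Bool.and_eq_true, decide_eq_true_eq, beq_iff_eq] at hd
    omega
  by_cases hu : 65 ≤ c.toNat ∧ c.toNat ≤ 90
  · -- uppercase
    have hidx : PySem.List.index? rotAlpha c = some (90 - c.toNat) := by
      have := upperIdx (90 - c.toNat) (by omega)
      rwa [show 90 - (90 - c.toNat) = c.toNat from by omega, hc] at this
    have hmem : c ∈ rotAlpha := by
      rw [← PySem.List.index?_isSome_iff, hidx]; rfl
    unfold segA
    rw [if_pos hmem, hidx]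
    dsimp only
    rw [PySem.List.pyGet?_of_nonneg rotAlpha (i := ((90 - c.toNat : Nat) : Int) + N) (by omega)]
    rw [show ((((90 - c.toNat : Nat)) : Int) + N).toNat = (90 - c.toNat) + N.toNat from by omega]
    rw [alphaGetHi ((90 - c.toNat) + N.toNat) (by omega)]
    simp only [Option.elim]
    unfold shiftCh
    rw [if_pos (show (65:Int) ≤ c.toNat ∧ (c.toNat:Int) ≤ 90 from by constructor <;> omega)]
    rw [PySem.Int.mod_eq_emod_of_pos (by omega)]
    rw [show (90 - (90 - c.toNat + N.toNat) % 26) = ((90:Int) - (90 - (c.toNat:Int) + N) % 26).toNat from by omega]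
  · by_cases hl : 97 ≤ c.toNat ∧ c.toNat ≤ 122
    · -- lowercase
      have hidx : PySem.List.index? rotAlpha c = some (51 + (122 - c.toNat)) := by
        have := lowerIdx (122 - c.toNat) (by omega)
        rwa [show 122 - (122 - c.toNat) = c.toNat from by omega, hc] at this
      have hmem : c ∈ rotAlpha := by
        rw [← PySem.List.index?_isSome_iff, hidx]; rfl
      unfold segA
      rw [if_pos hmem, hidx]
      dsimp only
      rw [PySem.List.pyGet?_of_nonneg rotAlpha (i := ((51 + (122 - c.toNat) : Nat) : Int) + N) (by omega)]
      rw [show (((51 + (122 - c.toNat) : Nat) : Int) + N).toNat = 51 + ((122 - c.toNat) + N.toNat) from by omega]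
      rw [alphaGetLo ((122 - c.toNat) + N.toNat) (by omega)]
      simp only [Option.elim]
      unfold shiftCh
      rw [if_neg (show ¬((65:Int) ≤ c.toNat ∧ (c.toNat:Int) ≤ 90) from by omega)]
      rw [if_pos (show (97:Int) ≤ c.toNat ∧ (c.toNat:Int) ≤ 122 from by constructor <;> omega)]
      rw [PySem.Int.mod_eq_emod_of_pos (by omega)]
      rw [show (122 - (122 - c.toNat + N.toNat) % 26) = ((122:Int) - (122 - (c.toNat:Int) + N) % 26).toNat from by omega]
    · -- not a letter: pass through unchanged on both sides
      have hmem : c ∉ rotAlpha := by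
        have := nonLetter c.toNat hlt (by omega)
        rwa [hc] at this
      unfold segA shiftCh
      rw [if_neg hmem]
      rw [if_neg (show ¬((65:Int) ≤ c.toNat ∧ (c.toNat:Int) ≤ 90) from by omega)]
      rw [if_neg (show ¬((97:Int) ≤ c.toNat ∧ (c.toNat:Int) ≤ 122) from by omega)]

theorem fold_eq (N : Int) : ∀ (l : List Char) (acc : List Char),
    (∀ c ∈ l, segA N c = [shiftCh N c]) →
    l.foldl (fun r i => r ++ segA N i) acc = l.foldl (fun r c => r ++ [shiftCh N c]) acc := by
  intro l
  induction l with
  | nil => intro acc _; rfl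
  | cons x xs ih =>
      intro acc h
      simp only [List.foldl_cons]
      rw [h x (by simp)]
      exact ih _ (fun c hc => h c (List.mem_cons_of_mem _ hc))

-- ===== VERDICT (by name: the statement is the Claim_ definition above) =====
theorem decryp_rotN_spec : Claim_equal_decryp_rotN := by
  intro s N hdom
  unfold Spec_decryp_rotN decryp_rotN decryp_rotN_alt
  split_ifs with h
  · rfl
  · rw [not_or, not_lt, not_lt] at h
    have hstr : pvDomStr s = true := by
      unfold Dom_decryp_rotN at hdom
      simp only [Bool.and_eq_true] at hdom
      exact hdom.1
    congr 1
    apply fold_eq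
    intro c hc
    exact perChar c N (by
      unfold pvDomStr at hstr
      exact List.all_eq_true.mp hstr c hc) h.1 h.2
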